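-- pv_equiv track=rewrite | github.com/Victorletzelter/algorithmic_trading | Trading_project/Functions_algo.py | Mouvements
-- ===== SOURCE A (Python) =====
-- def Mouvements(indMin,indMax,l) :
--     #Detection des tendances
--
--     Hausses=[] #liste contenant les tuples haussiers
--     Baisses=[] #liste contenant les tuples baissiers
--
--     '''Détection des hausses'''
--     i=0
--     lenMax=len(indMax)
--     while i<lenMax:
--         j=i
--         while j<(lenMax-1) and l[indMax[j+1]]>l[indMax[j]] :
--             j+=1
--         if i<j:
--             Hausses.append((indMax[i],indMax[j]))
--         i=j+1
--
--     '''Détection des baisses'''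
--     i=0
--     lenMin=len(indMin)
--     while i<lenMin:
--         j=i
--         while j<(lenMin-1) and l[indMin[j+1]]<l[indMin[j]] :
--             j+=1
--         if i<j:
--             Baisses.append((indMin[i],indMin[j]))
--
--         i=j+1
--
--     return(Hausses,Baisses)
-- ===== SOURCE B (Python) =====
-- def _group(table, idx):
--     # group maximal runs of True in table; run start..end -> (idx[start], idx[end+1])
--     res = []
--     start = None
--     for k, flag in enumerate(table):
--         if flag:
--             if start is None:
--                 start = k
--         else:
--             if start is not None:
--                 res.append((idx[start], idx[k]))
--                 start = None
--     if start is not None: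
--         res.append((idx[start], idx[len(table)]))
--     return res
--
-- def Mouvements(indMin, indMax, l):
--     ups = [l[indMax[k+1]] > l[indMax[k]] for k in range(len(indMax) - 1)]
--     downs = [l[indMin[k+1]] < l[indMin[k]] for k in range(len(indMin) - 1)]
--     return (_group(ups, indMax), _group(downs, indMin))
-- ===== Notes on version B (the rewrite author's own statement) =====
-- stated objective: alternative
-- what changed: A scans with nested while-loops jumping the outer index past each detected run; B first materialises a boolean comparison table over consecutive extrema and then makes a single state-machine pass over that table, grouping maximal runs of True.
import Mathlib
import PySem

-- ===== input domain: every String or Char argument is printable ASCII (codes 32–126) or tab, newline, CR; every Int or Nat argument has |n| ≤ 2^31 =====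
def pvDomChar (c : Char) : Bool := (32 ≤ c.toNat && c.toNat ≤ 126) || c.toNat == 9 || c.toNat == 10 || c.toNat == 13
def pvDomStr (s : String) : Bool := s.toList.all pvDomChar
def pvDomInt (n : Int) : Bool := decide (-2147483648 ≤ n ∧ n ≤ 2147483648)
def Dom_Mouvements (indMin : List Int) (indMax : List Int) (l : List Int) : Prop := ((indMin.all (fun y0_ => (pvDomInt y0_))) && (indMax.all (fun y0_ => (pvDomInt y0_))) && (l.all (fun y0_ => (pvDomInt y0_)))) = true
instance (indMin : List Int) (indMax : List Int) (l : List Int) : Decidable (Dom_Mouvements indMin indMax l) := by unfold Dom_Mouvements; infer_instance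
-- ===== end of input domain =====

-- B replaces A's nested while-loops by a precomputed boolean comparison table plus a
-- single grouping pass over it (alternative decomposition, same cost).


-- ===== PORT A =====
-- l[ind[k+1]] > l[ind[k]]  resp.  <  (positions k into ind are always in range when used)
def pvCmpUp (ind l : List Int) (k : Nat) : Bool :=
  decide (PySem.List.pyGetD l (ind.getD (k+1) 0) 0 > PySem.List.pyGetD l (ind.getD k 0) 0)

def pvCmpDown (ind l : List Int) (k : Nat) : Bool :=
  decide (PySem.List.pyGetD l (ind.getD (k+1) 0) 0 < PySem.List.pyGetD l (ind.getD k 0) 0)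

-- inner while loop: advance j while j < n-1 and c j
def pvInner (c : Nat → Bool) (n j : Nat) : Nat :=
  if j < n - 1 ∧ c j then pvInner c n (j+1) else j
termination_by n - 1 - j
decreasing_by omega

theorem le_pvInner (c : Nat → Bool) (n j : Nat) : j ≤ pvInner c n j := by
  fun_induction pvInner c n j with
  | case1 j h ih => omega
  | case2 j h => omega

-- outer while loop of A (used once per side, as in A's two identical loops)
def pvOuter (c : Nat → Bool) (idx : List Int) (n i : Nat) : List (Int × Int) :=
  if i < n then
    (if i < pvInner c n i then [(idx.getD i 0, idx.getD (pvInner c n i) 0)] else [])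
      ++ pvOuter c idx n (pvInner c n i + 1)
  else []
termination_by n - i
decreasing_by have := le_pvInner c n i; omega

def Mouvements (indMin : List Int) (indMax : List Int) (l : List Int) :
    (List (Int × Int)) × (List (Int × Int)) :=
  (pvOuter (pvCmpUp indMax l) indMax indMax.length 0,
   pvOuter (pvCmpDown indMin l) indMin indMin.length 0)

-- ===== PORT B =====
-- single pass over the boolean table, tracking the optional start of the current run
def pvGroup (idx : List Int) : List Bool → Nat → Option Nat → List (Int × Int)
  | [], _, none => []
  | [], k, some s => [(idx.getD s 0, idx.getD k 0)]
  | b :: rest, k, none =>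
      if b then pvGroup idx rest (k+1) (some k) else pvGroup idx rest (k+1) none
  | b :: rest, k, some s =>
      if b then pvGroup idx rest (k+1) (some s)
      else (idx.getD s 0, idx.getD k 0) :: pvGroup idx rest (k+1) none

def Mouvements_alt (indMin : List Int) (indMax : List Int) (l : List Int) :
    (List (Int × Int)) × (List (Int × Int)) :=
  let ups := (List.range (indMax.length - 1)).map (pvCmpUp indMax l)
  let downs := (List.range (indMin.length - 1)).map (pvCmpDown indMin l)
  (pvGroup indMax ups 0 none, pvGroup indMin downs 0 none)

-- ===== PRECONDITION & SPEC =====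
-- Pre_ excludes exactly the inputs on which A raises IndexError: whenever a side has at
-- least two extrema indices, every index of that side must be a valid Python index into l.
def Pre_Mouvements (indMin : List Int) (indMax : List Int) (l : List Int) : Prop :=
  (2 ≤ indMax.length → ∀ x ∈ indMax, PySem.Raise.InRange l.length x) ∧
  (2 ≤ indMin.length → ∀ x ∈ indMin, PySem.Raise.InRange l.length x)
instance (indMin : List Int) (indMax : List Int) (l : List Int) : Decidable (Pre_Mouvements indMin indMax l) := by unfold Pre_Mouvements; infer_instance

def pvWitness_Mouvements : List Int × List Int × List Int := ([2, 1, 0], [0, 1, 2], [1, 2, 3])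

def Spec_Mouvements (indMin : List Int) (indMax : List Int) (l : List Int) (out : (List (Int × Int)) × (List (Int × Int))) : Prop := out = Mouvements_alt indMin indMax l
instance (indMin : List Int) (indMax : List Int) (l : List Int) (out : (List (Int × Int)) × (List (Int × Int))) : Decidable (Spec_Mouvements indMin indMax l out) := by unfold Spec_Mouvements; infer_instance

-- ===== CLAIM (what is proved, stated in full; the proofs are below) =====
def Claim_equal_Mouvements : Prop := ∀ (indMin : List Int) (indMax : List Int) (l : List Int), Dom_Mouvements indMin indMax l → Pre_Mouvements indMin indMax l → Spec_Mouvements indMin indMax l (Mouvements indMin indMax l)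

-- ===== LEMMAS AND PROOFS =====
theorem pvTbl_drop_lt (c : Nat → Bool) (n k : Nat) (h : k < n - 1) :
    ((List.range (n-1)).map c).drop k = c k :: ((List.range (n-1)).map c).drop (k+1) := by
  rw [List.drop_eq_getElem_cons (by simpa using h)]
  simp

theorem pvTbl_drop_ge (c : Nat → Bool) (n k : Nat) (h : n - 1 ≤ k) :
    ((List.range (n-1)).map c).drop k = [] := by
  apply List.drop_eq_nil_of_le; simpa using h

theorem pvGroup_some (c : Nat → Bool) (idx : List Int) (n k : Nat) :
    ∀ s, pvGroup idx (((List.range (n-1)).map c).drop k) k (some s)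
      = (idx.getD s 0, idx.getD (pvInner c n k) 0)
        :: pvGroup idx (((List.range (n-1)).map c).drop (pvInner c n k + 1)) (pvInner c n k + 1) none := by
  fun_induction pvInner c n k with
  | case1 j h ih =>
    intro s
    rw [pvTbl_drop_lt c n j h.1, pvGroup, if_pos h.2]
    exact ih s
  | case2 j h =>
    intro s
    by_cases hk : j < n - 1
    · have hc : c j = false := by
        cases hcc : c j
        · rfl
        · exact absurd ⟨hk, hcc⟩ h
      rw [pvTbl_drop_lt c n j hk, pvGroup, hc, if_neg (by simp)]
    · rw [pvTbl_drop_ge c n j (by omega), pvTbl_drop_ge c n (j+1) (by omega)]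
      rfl

theorem pvOuter_eq_group (c : Nat → Bool) (idx : List Int) (n : Nat) :
    ∀ k, pvOuter c idx n k = pvGroup idx (((List.range (n-1)).map c).drop k) k none := by
  intro k
  fun_induction pvOuter c idx n k with
  | case1 i hi ih =>
    by_cases hk : i < n - 1
    · cases hc : c i
      · have hinner : pvInner c n i = i := by
          rw [pvInner]; simp [hc]
        rw [pvTbl_drop_lt c n i hk, pvGroup, hinner]
        rw [hinner] at ih
        simp [hc, ih]
      · have hinner : pvInner c n i = pvInner c n (i+1) := by
          rw [pvInner]; simp [hk, hc]
        have hgt : i < pvInner c n i := by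
          have := le_pvInner c n (i+1)
          omega
        rw [pvTbl_drop_lt c n i hk, pvGroup]
        rw [pvGroup_some c idx n (i+1) i, ← hinner, ih]
        simp [hc, hgt]
    · have hinner : pvInner c n i = i := by
        rw [pvInner]
        have h' : ¬ (i < n - 1 ∧ c i = true) := by intro hh; exact hk hh.1
        simp [h']
      rw [pvTbl_drop_ge c n i (by omega), hinner]
      rw [hinner, pvTbl_drop_ge c n (i+1) (by omega)] at ih
      simp [ih, pvGroup]
  | case2 i hi =>
    rw [pvTbl_drop_ge c n i (by omega)]
    rfl

theorem Mouvements_spec : Claim_equal_Mouvements := by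
  intro indMin indMax l _ _
  unfold Spec_Mouvements Mouvements Mouvements_alt
  have h1 := pvOuter_eq_group (pvCmpUp indMax l) indMax indMax.length 0
  have h2 := pvOuter_eq_group (pvCmpDown indMin l) indMin indMin.length 0
  simp only [List.drop_zero] at h1 h2
  simp [h1, h2]
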